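-- pv_equiv track=rewrite | github.com/AIGarifullin/BANK_tests | Eternal_contest/test_4_1.py | max_diff_between_begin_and_end_sums
-- ===== SOURCE A (Python) =====
-- def max_diff_between_begin_and_end_sums(n_k_data: list[int],
--                                         a_data: list[int]) -> int:
--     """Максимальная разность между начальной и конечной суммой."""
--     n, k = n_k_data[0], n_k_data[1]
--     a_data = sorted(a_data)
--     res = 0
--     i = 0
--     while i < k and k <= n:
--         if a_data[-1] < 10:
--             res += 9 - a_data[i]
--         elif 10 <= a_data[-1] < 99:
--             res += 90 + a_data[-1-i] % 10 - a_data[-1-i]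
--         else:
--             res += 90 + a_data[-2-i] % 10 - a_data[-2-i]
--         i += 1
--     return res
-- ===== SOURCE B (Python) =====
-- def _part(xs, p):
--     """Three-way partition of xs around pivot value p."""
--     return ([x for x in xs if x < p],
--             [x for x in xs if x == p],
--             [x for x in xs if x > p])
--
--
-- def _smallest(xs, k):
--     """Some k smallest elements of xs (multiset of them; order unspecified)."""
--     if k <= 0:
--         return []
--     if len(xs) <= k:
--         return xs
--     lo, eq, hi = _part(xs, xs[0])
--     if k <= len(lo):
--         return _smallest(lo, k)
--     if k <= len(lo) + len(eq):
--         return lo + eq[:k - len(lo)]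
--     return lo + eq + _smallest(hi, k - len(lo) - len(eq))
--
--
-- def _largest(xs, k):
--     """Some k largest elements of xs (multiset of them; order unspecified)."""
--     if k <= 0:
--         return []
--     if len(xs) <= k:
--         return xs
--     lo, eq, hi = _part(xs, xs[0])
--     if k <= len(hi):
--         return _largest(hi, k)
--     if k <= len(hi) + len(eq):
--         return eq[:k - len(hi)] + hi
--     return _largest(lo, k - len(hi) - len(eq)) + eq + hi
--
--
-- def max_diff_between_begin_and_end_sums(n_k_data: list[int],
--                                         a_data: list[int]) -> int:
--     """Quickselect (three-way partition) instead of sorting: pick the branch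
--     from max(a_data), select the needed k-element multiset, sum it."""
--     n, k = n_k_data[0], n_k_data[1]
--     if k <= 0 or k > n:
--         return 0
--     mx = max(a_data)
--     if mx < 10:
--         return sum(9 - x for x in _smallest(a_data, k))
--     if mx < 99:
--         return sum(90 - 10 * (x // 10) for x in _largest(a_data, k))
--     rest = list(a_data)
--     rest.remove(mx)
--     return sum(90 - 10 * (x // 10) for x in _largest(rest, k))
-- ===== Notes on version B (the rewrite author's own statement) =====
-- stated objective: faster
-- what changed: A sorts the whole list and walks it with an indexed while loop; B never sorts: it picks the branch from max(a_data) in one pass, extracts the needed k-element multiset (k smallest, k largest, or k largest after removing one copy of the max) by recursive three-way-partition quickselect, and sums it order-independently.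
import Mathlib
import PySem

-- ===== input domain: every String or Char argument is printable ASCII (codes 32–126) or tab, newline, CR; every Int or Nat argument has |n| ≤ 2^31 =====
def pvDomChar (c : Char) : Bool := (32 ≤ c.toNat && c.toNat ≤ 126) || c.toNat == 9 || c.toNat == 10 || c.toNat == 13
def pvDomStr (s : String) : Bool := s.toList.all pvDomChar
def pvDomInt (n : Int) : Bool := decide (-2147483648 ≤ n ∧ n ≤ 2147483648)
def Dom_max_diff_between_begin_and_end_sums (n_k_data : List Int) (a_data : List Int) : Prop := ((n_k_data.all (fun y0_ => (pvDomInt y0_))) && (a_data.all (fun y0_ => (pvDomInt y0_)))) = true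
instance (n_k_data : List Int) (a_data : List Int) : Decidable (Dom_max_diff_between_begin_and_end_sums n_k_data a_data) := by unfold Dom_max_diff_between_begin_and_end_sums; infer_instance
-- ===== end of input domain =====

-- B replaces A's sort-and-indexed-loop by quickselect: branch chosen from max(a_data),
-- the needed k-element multiset selected by three-way partition, then summed.

-- ===== PORT A =====
-- the while loop of A: state (i, res); condition 'i < k and k <= n'; branch order preserved
def pvALoop (k n : Int) (s : List Int) (i res : Int) : Int :=
  if i < k ∧ k ≤ n then
    pvALoop k n s (i + 1)
      (if PySem.List.pyGetD s (-1) 0 < 10 then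
        res + (9 - PySem.List.pyGetD s i 0)
      else if 10 ≤ PySem.List.pyGetD s (-1) 0 ∧ PySem.List.pyGetD s (-1) 0 < 99 then
        res + (90 + PySem.Int.mod (PySem.List.pyGetD s (-1 - i) 0) 10 - PySem.List.pyGetD s (-1 - i) 0)
      else
        res + (90 + PySem.Int.mod (PySem.List.pyGetD s (-2 - i) 0) 10 - PySem.List.pyGetD s (-2 - i) 0))
  else res
termination_by (k - i).toNat
decreasing_by omega

def max_diff_between_begin_and_end_sums (n_k_data : List Int) (a_data : List Int) : Int :=
  let n := PySem.List.pyGetD n_k_data 0 0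
  let k := PySem.List.pyGetD n_k_data 1 0
  let s := PySem.List.sorted a_data (fun x => x) false
  pvALoop k n s 0 0

-- ===== PORT B =====
-- a filter keeping strictly fewer elements than xs has, when some p ∈ xs fails the test
-- (cited by the ports' decreasing_by)
lemma pvFilterLt {q : Int → Bool} {xs : List Int} {p : Int}
    (hp : p ∈ xs) (hq : q p = false) : (xs.filter q).length < xs.length := by
  have hsub : (xs.filter q).Sublist xs := List.filter_sublist
  rcases Nat.lt_or_ge (xs.filter q).length xs.length with h | h
  · exact h
  · have heq : xs.filter q = xs := hsub.eq_of_length_le h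
    have hpf : p ∈ xs.filter q := by rw [heq]; exact hp
    rw [List.mem_filter] at hpf
    simp [hq] at hpf

-- _part in Source B: three list comprehensions around the pivot
def pvPart (xs : List Int) (p : Int) : List Int × List Int × List Int :=
  (xs.filter (fun x => decide (x < p)),
   xs.filter (fun x => decide (x = p)),
   xs.filter (fun x => decide (p < x)))

-- _smallest in Source B
def pvSmallest (xs : List Int) (k : Int) : List Int :=
  if k ≤ 0 then []
  else if (xs.length : Int) ≤ k then xs
  else
    let t := pvPart xs (PySem.List.pyGetD xs 0 0)
    let lo := t.1; let eq := t.2.1; let hi := t.2.2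
    if k ≤ (lo.length : Int) then pvSmallest lo k
    else if k ≤ (lo.length : Int) + (eq.length : Int) then
      lo ++ PySem.List.slice eq none (some (k - lo.length))
    else lo ++ eq ++ pvSmallest hi (k - lo.length - eq.length)
termination_by xs.length
decreasing_by
  · exact pvFilterLt (PySem.List.pyGetD_mem xs (i := 0) 0 (by simp [PySem.Raise.InRange]; omega)) (by simp)
  · exact pvFilterLt (PySem.List.pyGetD_mem xs (i := 0) 0 (by simp [PySem.Raise.InRange]; omega)) (by simp)

-- _largest in Source B
def pvLargest (xs : List Int) (k : Int) : List Int :=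
  if k ≤ 0 then []
  else if (xs.length : Int) ≤ k then xs
  else
    let t := pvPart xs (PySem.List.pyGetD xs 0 0)
    let lo := t.1; let eq := t.2.1; let hi := t.2.2
    if k ≤ (hi.length : Int) then pvLargest hi k
    else if k ≤ (hi.length : Int) + (eq.length : Int) then
      PySem.List.slice eq none (some (k - hi.length)) ++ hi
    else pvLargest lo (k - hi.length - eq.length) ++ eq ++ hi
termination_by xs.length
decreasing_by
  · exact pvFilterLt (PySem.List.pyGetD_mem xs (i := 0) 0 (by simp [PySem.Raise.InRange]; omega)) (by simp)
  · exact pvFilterLt (PySem.List.pyGetD_mem xs (i := 0) 0 (by simp [PySem.Raise.InRange]; omega)) (by simp)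

def max_diff_between_begin_and_end_sums_alt (n_k_data : List Int) (a_data : List Int) : Int :=
  let n := PySem.List.pyGetD n_k_data 0 0
  let k := PySem.List.pyGetD n_k_data 1 0
  if k ≤ 0 ∨ n < k then 0
  else
    let mx := (PySem.List.max? a_data (fun x => x)).getD 0
    if mx < 10 then
      ((pvSmallest a_data k).map (fun x => 9 - x)).sum
    else if mx < 99 then
      ((pvLargest a_data k).map (fun x => 90 - 10 * PySem.Int.floordiv x 10)).sum
    else
      let rest := (PySem.List.remove? a_data mx).getD []
      ((pvLargest rest k).map (fun x => 90 - 10 * PySem.Int.floordiv x 10)).sum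

-- ===== PRECONDITION & SPEC =====
-- Pre_ excludes exactly the inputs on which A raises IndexError: fewer than two
-- entries in n_k_data, or (when the loop runs, 1 ≤ k ≤ n) too few elements in
-- a_data for the indices the chosen branch reads (k of them; k+1 when max ≥ 99).
def Pre_max_diff_between_begin_and_end_sums (n_k_data : List Int) (a_data : List Int) : Prop :=
  2 ≤ n_k_data.length ∧
  (1 ≤ PySem.List.pyGetD n_k_data 1 0 ∧ PySem.List.pyGetD n_k_data 1 0 ≤ PySem.List.pyGetD n_k_data 0 0 →
    PySem.List.pyGetD n_k_data 1 0 + (if a_data.any (fun x => decide (99 ≤ x)) then 1 else 0)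
      ≤ (a_data.length : Int))
instance (n_k_data : List Int) (a_data : List Int) : Decidable (Pre_max_diff_between_begin_and_end_sums n_k_data a_data) := by unfold Pre_max_diff_between_begin_and_end_sums; infer_instance
def pvWitness_max_diff_between_begin_and_end_sums : List Int × List Int := ([5, 2], [1, 3, 120])

def Spec_max_diff_between_begin_and_end_sums (n_k_data : List Int) (a_data : List Int) (out : Int) : Prop := out = max_diff_between_begin_and_end_sums_alt n_k_data a_data
instance (n_k_data : List Int) (a_data : List Int) (out : Int) : Decidable (Spec_max_diff_between_begin_and_end_sums n_k_data a_data out) := by unfold Spec_max_diff_between_begin_and_end_sums; infer_instance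

-- ===== CLAIM (what is proved, stated in full; the proofs are below) =====
def Claim_equal_max_diff_between_begin_and_end_sums : Prop := ∀ (n_k_data : List Int) (a_data : List Int), Dom_max_diff_between_begin_and_end_sums n_k_data a_data → Pre_max_diff_between_begin_and_end_sums n_k_data a_data → Spec_max_diff_between_begin_and_end_sums n_k_data a_data (max_diff_between_begin_and_end_sums n_k_data a_data)

-- ===== LEMMAS AND PROOFS =====

-- the per-iteration increment of A's loop (for the loop-sum characterisation)
def pvStep (s : List Int) (i : Int) : Int :=
  if PySem.List.pyGetD s (-1) 0 < 10 then
    9 - PySem.List.pyGetD s i 0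
  else if 10 ≤ PySem.List.pyGetD s (-1) 0 ∧ PySem.List.pyGetD s (-1) 0 < 99 then
    90 + PySem.Int.mod (PySem.List.pyGetD s (-1 - i) 0) 10 - PySem.List.pyGetD s (-1 - i) 0
  else
    90 + PySem.Int.mod (PySem.List.pyGetD s (-2 - i) 0) 10 - PySem.List.pyGetD s (-2 - i) 0

lemma pvALoop_sum (c : Nat) : ∀ (k n i res : Int) (s : List Int), k ≤ n → i + c = k →
    pvALoop k n s i res = res + ∑ j ∈ Finset.range c, pvStep s (i + j) := by
  induction c with
  | zero =>
    intro k n i res s hkn hik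
    rw [pvALoop]
    simp
    omega
  | succ c ih =>
    intro k n i res s hkn hik
    rw [pvALoop]
    have hlt : i < k ∧ k ≤ n := ⟨by push_cast at hik ⊢; omega, hkn⟩
    rw [if_pos hlt]
    rw [ih k n (i + 1) _ s hkn (by push_cast at hik ⊢; omega)]
    rw [Finset.sum_range_succ']
    have h1 : ∀ j : ℕ, i + ((j : ℤ) + 1) = i + 1 + (j : ℤ) := by intro j; ring
    push_cast
    simp only [h1, add_zero]
    simp only [pvStep]
    split_ifs <;> ring

-- sum of a mapped list as an indexed sum
lemma sum_map_getD (f : Int → Int) : ∀ (t : List Int),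
    (t.map f).sum = ∑ j ∈ Finset.range t.length, f (t.getD j 0) := by
  intro t
  induction t with
  | nil => simp
  | cons a t ih =>
    simp only [List.map_cons, List.sum_cons, List.length_cons]
    rw [Finset.sum_range_succ']
    simp [ih]
    ring

-- sum of f over an initial segment, as an indexed sum
lemma takeMapSum (f : Int → Int) (s : List Int) (K : Nat) (h : K ≤ s.length) :
    ((s.take K).map f).sum = ∑ j ∈ Finset.range K, f (s.getD j 0) := by
  rw [sum_map_getD, List.length_take, Nat.min_eq_left h]
  refine Finset.sum_congr rfl (fun j hj => ?_)
  simp only [Finset.mem_range] at hj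
  simp [List.getD, hj]

-- sum of f over a final segment, reading it back-to-front
lemma dropMapSum (f : Int → Int) (s : List Int) (K : Nat) (h : K ≤ s.length) :
    ((s.drop (s.length - K)).map f).sum
      = ∑ j ∈ Finset.range K, f (s.getD (s.length - 1 - j) 0) := by
  rw [sum_map_getD]
  have hlen : (s.drop (s.length - K)).length = K := by
    rw [List.length_drop]; omega
  rw [hlen]
  rw [← Finset.sum_range_reflect (fun j => f ((s.drop (s.length - K)).getD j 0)) K]
  refine Finset.sum_congr rfl (fun j hj => ?_)
  simp only [Finset.mem_range] at hj
  have h1 : (s.drop (s.length - K)).getD (K - 1 - j) 0 = s.getD ((s.length - K) + (K - 1 - j)) 0 := by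
    simp [List.getD, List.getElem?_drop]
  rw [h1]
  have hidx : s.length - K + (K - 1 - j) = s.length - 1 - j := by omega
  rw [hidx]

-- the three-way partition is a rearrangement of the list
lemma pvPart_perm (xs : List Int) (p : Int) :
    ((pvPart xs p).1 ++ (pvPart xs p).2.1 ++ (pvPart xs p).2.2).Perm xs := by
  simp only [pvPart]
  induction xs with
  | nil => simp
  | cons a xs ih =>
    simp only [List.filter_cons]
    rcases lt_trichotomy a p with h | h | h
    · simp only [decide_eq_true_eq, if_pos h, if_neg (by omega : ¬ a = p), if_neg (by omega : ¬ p < a)]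
      exact ih.cons a
    · simp only [decide_eq_true_eq, if_neg (by omega : ¬ a < p), if_pos h, if_neg (by omega : ¬ p < a)]
      exact List.Perm.trans (List.perm_middle.append_right _) (ih.cons a)
    · simp only [decide_eq_true_eq, if_neg (by omega : ¬ a < p), if_neg (by omega : ¬ a = p), if_pos h]
      exact List.Perm.trans List.perm_middle (ih.cons a)

-- sorted(xs) splits along the partition classes
lemma pvPart_sorted (xs : List Int) (p : Int) :
    PySem.List.sorted xs (fun x => x) false
      = PySem.List.sorted (pvPart xs p).1 (fun x => x) false
        ++ (pvPart xs p).2.1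
        ++ PySem.List.sorted (pvPart xs p).2.2 (fun x => x) false := by
  apply PySem.List.sorted_id_eq_of_perm_of_pairwise
  · exact List.Perm.trans
      (((PySem.List.sorted_perm _ _ _).append_right _).append (PySem.List.sorted_perm _ _ _))
      (pvPart_perm xs p)
  · have hlo : ∀ x ∈ PySem.List.sorted (pvPart xs p).1 (fun x => x) false, x < p := by
      intro x hx
      rw [PySem.List.mem_sorted] at hx
      simpa using (List.mem_filter.mp hx).2
    have heq : ∀ x ∈ (pvPart xs p).2.1, x = p := by
      intro x hx
      simpa using (List.mem_filter.mp hx).2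
    have hhi : ∀ x ∈ PySem.List.sorted (pvPart xs p).2.2 (fun x => x) false, p < x := by
      intro x hx
      rw [PySem.List.mem_sorted] at hx
      simpa using (List.mem_filter.mp hx).2
    rw [List.pairwise_append]
    refine ⟨?_, ?_, ?_⟩
    · rw [List.pairwise_append]
      refine ⟨PySem.List.sorted_pairwise _ _, ?_, ?_⟩
      · exact List.pairwise_of_forall_mem_list (fun a ha b hb => by
          rw [heq a ha, heq b hb])
      · intro a ha b hb
        have := hlo a ha; have := heq b hb; omega
    · exact PySem.List.sorted_pairwise _ _
    · intro a ha b hb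
      rcases List.mem_append.mp ha with h | h
      · have := hlo a h; have := hhi b hb; omega
      · have := heq a h; have := hhi b hb; omega

-- quickselect returns a permutation of the first k of sorted(xs)
lemma pvSmallest_perm : ∀ (N : Nat) (xs : List Int) (k : Int), xs.length ≤ N →
    0 ≤ k → k ≤ (xs.length : Int) →
    (pvSmallest xs k).Perm ((PySem.List.sorted xs (fun x => x) false).take k.toNat) := by
  intro N
  induction N with
  | zero =>
    intro xs k hN h0 hk
    rw [pvSmallest, if_pos (by omega : k ≤ 0)]
    have : k.toNat = 0 := by omega
    simp [this]
  | succ N ih =>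
    intro xs k hN h0 hk
    rw [pvSmallest]
    by_cases hk0 : k ≤ 0
    · rw [if_pos hk0]
      have : k.toNat = 0 := by omega
      simp [this]
    · rw [if_neg hk0]
      by_cases hlen : (xs.length : Int) ≤ k
      · rw [if_pos hlen]
        rw [List.take_of_length_le (by rw [PySem.List.length_sorted]; omega)]
        exact (PySem.List.sorted_perm _ _ _).symm
      · rw [if_neg hlen]
        have hpmem : PySem.List.pyGetD xs 0 0 ∈ xs :=
          PySem.List.pyGetD_mem xs (i := 0) 0 (by simp [PySem.Raise.InRange]; omega)
        set p := PySem.List.pyGetD xs 0 0 with hp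
        have hloLt : (pvPart xs p).1.length < xs.length := pvFilterLt hpmem (by simp)
        have hhiLt : (pvPart xs p).2.2.length < xs.length := pvFilterLt hpmem (by simp)
        have hLEN : (pvPart xs p).1.length + (pvPart xs p).2.1.length + (pvPart xs p).2.2.length
            = xs.length := by
          have := (pvPart_perm xs p).length_eq
          simp only [List.length_append] at this
          omega
        have hsplit := pvPart_sorted xs p
        simp only []
        rw [hsplit, List.take_append, List.take_append,
          PySem.List.length_sorted, List.length_append, PySem.List.length_sorted]
        by_cases h1 : k ≤ ((pvPart xs p).1.length : Int)
        · rw [if_pos h1]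
          have e1 : k.toNat - (pvPart xs p).1.length = 0 := by omega
          have e2 : k.toNat - ((pvPart xs p).1.length + (pvPart xs p).2.1.length) = 0 := by omega
          rw [e1, e2]
          simp only [List.take_zero, List.append_nil]
          exact ih _ k (by omega) (by omega) (by omega)
        · rw [if_neg h1]
          by_cases h2 : k ≤ ((pvPart xs p).1.length : Int) + ((pvPart xs p).2.1.length : Int)
          · rw [if_pos h2]
            have e2 : k.toNat - ((pvPart xs p).1.length + (pvPart xs p).2.1.length) = 0 := by omega
            rw [e2, List.take_of_length_le (by rw [PySem.List.length_sorted]; omega)]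
            simp only [List.take_zero, List.append_nil]
            rw [PySem.List.slice_to _ (by omega : (0:Int) ≤ k - (pvPart xs p).1.length)]
            have e3 : (k - ((pvPart xs p).1.length : Int)).toNat = k.toNat - (pvPart xs p).1.length := by
              omega
            rw [e3]
            exact (PySem.List.sorted_perm _ _ _).symm.append_right _
          · rw [if_neg h2]
            rw [List.take_of_length_le (by rw [PySem.List.length_sorted]; omega),
              List.take_of_length_le (by omega)]
            have e3 : (k - ((pvPart xs p).1.length : Int) - ((pvPart xs p).2.1.length : Int)).toNat
                = k.toNat - ((pvPart xs p).1.length + (pvPart xs p).2.1.length) := by omega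
            refine List.Perm.append (List.Perm.append ((PySem.List.sorted_perm _ _ _).symm) (List.Perm.refl _)) ?_
            rw [← e3]
            exact ih _ _ (by omega) (by omega) (by omega)

-- all elements of the middle partition class equal the pivot
lemma pvPart_eq_replicate (xs : List Int) (p : Int) :
    (pvPart xs p).2.1 = List.replicate (pvPart xs p).2.1.length p := by
  rw [List.eq_replicate_length]
  intro b hb
  simpa using (List.mem_filter.mp hb).2

-- quickselect returns a permutation of the last k of sorted(xs)
lemma pvLargest_perm : ∀ (N : Nat) (xs : List Int) (k : Int), xs.length ≤ N →
    0 ≤ k → k ≤ (xs.length : Int) →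
    (pvLargest xs k).Perm
      ((PySem.List.sorted xs (fun x => x) false).drop
        ((PySem.List.sorted xs (fun x => x) false).length - k.toNat)) := by
  intro N
  induction N with
  | zero =>
    intro xs k hN h0 hk
    rw [pvLargest, if_pos (by omega : k ≤ 0)]
    have hx : xs = [] := List.eq_nil_of_length_eq_zero (by omega)
    simp [hx, PySem.List.sorted]
  | succ N ih =>
    intro xs k hN h0 hk
    rw [pvLargest]
    by_cases hk0 : k ≤ 0
    · rw [if_pos hk0]
      have : k.toNat = 0 := by omega
      rw [this, List.drop_eq_nil_of_le (by omega)]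
    · rw [if_neg hk0]
      by_cases hlen : (xs.length : Int) ≤ k
      · rw [if_pos hlen]
        have : (PySem.List.sorted xs (fun x => x) false).length - k.toNat = 0 := by
          rw [PySem.List.length_sorted]; omega
        rw [this, List.drop_zero]
        exact (PySem.List.sorted_perm _ _ _).symm
      · rw [if_neg hlen]
        have hpmem : PySem.List.pyGetD xs 0 0 ∈ xs :=
          PySem.List.pyGetD_mem xs (i := 0) 0 (by simp [PySem.Raise.InRange]; omega)
        set p := PySem.List.pyGetD xs 0 0 with hp
        have hloLt : (pvPart xs p).1.length < xs.length := pvFilterLt hpmem (by simp)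
        have hhiLt : (pvPart xs p).2.2.length < xs.length := pvFilterLt hpmem (by simp)
        have hLEN : (pvPart xs p).1.length + (pvPart xs p).2.1.length + (pvPart xs p).2.2.length
            = xs.length := by
          have := (pvPart_perm xs p).length_eq
          simp only [List.length_append] at this
          omega
        have hsplit := pvPart_sorted xs p
        simp only []
        rw [hsplit]
        rw [List.length_append, List.length_append, PySem.List.length_sorted,
          PySem.List.length_sorted,
          List.drop_append, List.drop_append,
          PySem.List.length_sorted, List.length_append, PySem.List.length_sorted]
        by_cases h1 : k ≤ ((pvPart xs p).2.2.length : Int)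
        · rw [if_pos h1]
          rw [List.drop_eq_nil_of_le (by rw [PySem.List.length_sorted]; omega),
            List.drop_eq_nil_of_le (by omega)]
          have e1 : (pvPart xs p).1.length + (pvPart xs p).2.1.length + (pvPart xs p).2.2.length
              - k.toNat - ((pvPart xs p).1.length + (pvPart xs p).2.1.length)
              = (PySem.List.sorted (pvPart xs p).2.2 (fun x => x) false).length - k.toNat := by
            rw [PySem.List.length_sorted]; omega
          rw [e1]
          simp only [List.nil_append]
          exact ih _ k (by omega) (by omega) (by omega)
        · rw [if_neg h1]
          by_cases h2 : k ≤ ((pvPart xs p).2.2.length : Int) + ((pvPart xs p).2.1.length : Int)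
          · rw [if_pos h2]
            rw [List.drop_eq_nil_of_le (by rw [PySem.List.length_sorted]; omega)]
            have e2 : (pvPart xs p).1.length + (pvPart xs p).2.1.length + (pvPart xs p).2.2.length
                - k.toNat - ((pvPart xs p).1.length + (pvPart xs p).2.1.length) = 0 := by omega
            rw [e2, List.drop_zero]
            simp only [List.nil_append]
            refine List.Perm.append ?_ ((PySem.List.sorted_perm _ _ _).symm)
            rw [PySem.List.slice_to _ (by omega : (0:Int) ≤ k - (pvPart xs p).2.2.length)]
            rw [pvPart_eq_replicate xs p, List.take_replicate, List.drop_replicate]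
            have : min (k - ((pvPart xs p).2.2.length : Int)).toNat (pvPart xs p).2.1.length
                = (pvPart xs p).2.1.length
                  - ((pvPart xs p).1.length + (pvPart xs p).2.1.length + (pvPart xs p).2.2.length
                    - k.toNat - (pvPart xs p).1.length) := by omega
            rw [this]
            simp
          · rw [if_neg h2]
            have e2 : (pvPart xs p).1.length + (pvPart xs p).2.1.length + (pvPart xs p).2.2.length
                - k.toNat - ((pvPart xs p).1.length + (pvPart xs p).2.1.length) = 0 := by omega
            have e3 : (pvPart xs p).1.length + (pvPart xs p).2.1.length + (pvPart xs p).2.2.length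
                - k.toNat - (pvPart xs p).1.length = 0 := by omega
            rw [e2, e3, List.drop_zero, List.drop_zero]
            refine List.Perm.append (List.Perm.append ?_ (List.Perm.refl _))
              ((PySem.List.sorted_perm _ _ _).symm)
            have e4 : (pvPart xs p).1.length + (pvPart xs p).2.1.length + (pvPart xs p).2.2.length
                - k.toNat
                = (PySem.List.sorted (pvPart xs p).1 (fun x => x) false).length
                  - (k - ((pvPart xs p).2.2.length : Int) - ((pvPart xs p).2.1.length : Int)).toNat := by
              rw [PySem.List.length_sorted]; omega
            rw [e4]
            exact ih _ _ (by omega) (by omega) (by omega)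

-- ===== VERDICT (by name: the statement is the Claim_ definition above) =====
theorem max_diff_between_begin_and_end_sums_spec : Claim_equal_max_diff_between_begin_and_end_sums := by
  intro nk ad _ hpre
  unfold Spec_max_diff_between_begin_and_end_sums
  unfold max_diff_between_begin_and_end_sums max_diff_between_begin_and_end_sums_alt
  set n := PySem.List.pyGetD nk 0 0 with hn
  set k := PySem.List.pyGetD nk 1 0 with hk
  set s := PySem.List.sorted ad (fun x => x) false with hs
  by_cases hcase : 1 ≤ k ∧ k ≤ n
  · obtain ⟨hk1, hkn⟩ := hcase
    have hlen := hpre.2 ⟨hk1, hkn⟩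
    have hkL : k ≤ (ad.length : ℤ) := by
      have : (0:ℤ) ≤ (if (ad.any fun x => decide (99 ≤ x)) = true then 1 else 0) := by
        split_ifs <;> norm_num
      omega
    set K := k.toNat with hKdef
    have hkK : k = (K : ℤ) := by omega
    have hsL : s.length = ad.length := PySem.List.length_sorted ad _ _
    have hK1 : 1 ≤ K := by omega
    have hKle : K ≤ s.length := by omega
    have hsne : s ≠ [] := List.ne_nil_of_length_pos (by omega)
    have hadne : ad ≠ [] := List.ne_nil_of_length_pos (by omega)
    rw [if_neg (by omega)]
    have hA := pvALoop_sum K k n 0 0 s hkn (by omega)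
    rw [hA, zero_add]
    set mx := PySem.List.pyGetD s (-1) 0 with hmx
    have hlast : mx = s.getLast hsne := by
      rw [hmx, PySem.List.pyGetD_neg_one _ _ hsne]
    have hpws : s.Pairwise (· ≤ ·) := by
      have := PySem.List.sorted_pairwise ad (fun x => x)
      rw [← hs] at this
      simpa using this
    have hle_last : ∀ x ∈ s, x ≤ s.getLast hsne := by
      intro x hx
      have hsplit2 : s.dropLast ++ [s.getLast hsne] = s := List.dropLast_append_getLast hsne
      rw [← hsplit2] at hx hpws
      rcases List.mem_append.mp hx with h | h
      · exact (List.pairwise_append.mp hpws).2.2 x h _ (by simp)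
      · simp at h
        omega
    -- the selector B computes (max of a_data) is the last element of sorted(a_data)
    have hmaxB : (PySem.List.max? ad (fun x => x)).getD 0 = mx := by
      cases hopt : PySem.List.max? ad (fun x => x) with
      | none =>
        rw [PySem.List.max?_eq_none_iff] at hopt
        exact absurd hopt hadne
      | some m =>
        simp only [Option.getD_some]
        have hmmem : m ∈ ad := PySem.List.max?_mem hopt
        have hmaxm : ∀ y ∈ ad, y ≤ m := by
          have := PySem.List.max?_isMax hopt
          simpa using this
        have hlastmem : s.getLast hsne ∈ ad :=
          (PySem.List.mem_sorted _ _ _ _).mp (List.getLast_mem hsne)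
        have h1 : s.getLast hsne ≤ m := hmaxm _ hlastmem
        have h2 : m ≤ s.getLast hsne :=
          hle_last m ((PySem.List.mem_sorted _ _ _ _).mpr hmmem)
        omega
    rw [hmaxB]
    by_cases h10 : mx < 10
    · -- every element below 10: the k smallest, each contributing 9 - x
      rw [if_pos h10]
      have hsm := pvSmallest_perm ad.length ad k (le_refl _) (by omega) (by omega)
      rw [← hs] at hsm
      rw [((hsm.map (fun x => 9 - x)).sum_eq), hkK]
      have hKK : ((K : ℤ)).toNat = K := by omega
      rw [hKK, takeMapSum _ s K hKle]
      refine Finset.sum_congr rfl (fun j hj => ?_)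
      simp only [Finset.mem_range] at hj
      simp only [pvStep, zero_add]
      rw [← hmx, if_pos h10, PySem.List.pyGetD_natCast]
    · rw [if_neg h10]
      have h10' : 10 ≤ mx := by omega
      by_cases h99 : mx < 99
      · -- two-digit maximum: the k largest, each contributing 90 - 10*(x // 10)
        rw [if_pos h99]
        have hlg := pvLargest_perm ad.length ad k (le_refl _) (by omega) (by omega)
        rw [← hs] at hlg
        rw [((hlg.map (fun x => 90 - 10 * PySem.Int.floordiv x 10)).sum_eq), hkK, hsL]
        have hKK : ((K : ℤ)).toNat = K := by omega
        rw [hKK, ← hsL, dropMapSum _ s K hKle]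
        refine Finset.sum_congr rfl (fun j hj => ?_)
        simp only [Finset.mem_range] at hj
        simp only [pvStep, zero_add]
        rw [← hmx, if_neg h10, if_pos (And.intro h10' h99)]
        have he : (-1 - (j:ℤ)) = -(((j+1 : ℕ)):ℤ) := by push_cast; ring
        rw [he, PySem.List.pyGetD_neg_natCast _ _ _ (by omega) (by omega)]
        have hg : s[s.length - (j+1)]'(by omega) = s.getD (s.length - 1 - j) 0 := by
          rw [List.getD_eq_getElem _ _ (by omega)]
          congr 1
          omega
        rw [hg]
        have hdm := PySem.Int.floordiv_mul_add_mod (s.getD (s.length - 1 - j) 0) 10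
        omega
      · -- maximum ≥ 99: remove one copy of the max, then the k largest of the rest
        rw [if_neg h99]
        have h99' : 99 ≤ mx := by omega
        have hmxmem : mx ∈ ad := by
          have h2 : mx ∈ s := hlast ▸ List.getLast_mem hsne
          exact (PySem.List.mem_sorted _ _ _ _).mp h2
        have hany : (ad.any fun x => decide (99 ≤ x)) = true := by
          rw [List.any_eq_true]
          exact ⟨mx, hmxmem, by simpa using h99'⟩
        rw [if_pos hany] at hlen
        have hK1L : K + 1 ≤ s.length := by omega
        have hrest : (PySem.List.remove? ad mx).getD [] = ad.erase mx := by
          have h6 := PySem.List.remove?_eq_some_erase ad mx hmxmem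
          rw [h6]
          rfl
        rw [hrest]
        -- sorted(a_data minus one copy of the max) is sorted(a_data) without its last element
        have hsplit2 : s.dropLast ++ [mx] = s := by
          rw [hlast]
          exact List.dropLast_append_getLast hsne
        have hdlperm : (ad.erase mx).Perm s.dropLast := by
          have h1 : ad.Perm s := by
            rw [hs]
            exact (PySem.List.sorted_perm ad _ _).symm
          refine (h1.erase mx).trans ?_
          have h4 := List.perm_append_singleton mx s.dropLast
          rw [hsplit2] at h4
          have h5 := h4.erase mx
          rw [List.erase_cons_head] at h5
          exact h5
        have hpwdl : s.dropLast.Pairwise (· ≤ ·) := by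
          have := PySem.List.sorted_pairwise ad (fun x => x)
          rw [← hs] at this
          simpa using this.sublist (List.dropLast_sublist s)
        have hsortedrest : PySem.List.sorted (ad.erase mx) (fun x => x) false = s.dropLast :=
          PySem.List.sorted_id_eq_of_perm_of_pairwise _ _ hdlperm.symm hpwdl
        have hrl : (ad.erase mx).length = ad.length - 1 := List.length_erase_of_mem hmxmem
        have hlg := pvLargest_perm (ad.erase mx).length (ad.erase mx) k (le_refl _)
          (by omega) (by rw [hrl]; omega)
        rw [hsortedrest] at hlg
        rw [((hlg.map (fun x => 90 - 10 * PySem.Int.floordiv x 10)).sum_eq), hkK]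
        have hKK : ((K : ℤ)).toNat = K := by omega
        rw [hKK, dropMapSum _ s.dropLast K (by rw [List.length_dropLast]; omega)]
        refine Finset.sum_congr rfl (fun j hj => ?_)
        simp only [Finset.mem_range] at hj
        simp only [pvStep, zero_add]
        rw [← hmx, if_neg h10,
          if_neg (show ¬ (10 ≤ mx ∧ mx < 99) from fun h => h99 h.2)]
        have he : (-2 - (j:ℤ)) = -(((j+2 : ℕ)):ℤ) := by push_cast; ring
        rw [he, PySem.List.pyGetD_neg_natCast _ _ _ (by omega) (by omega)]
        have hg : s[s.length - (j+2)]'(by omega)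
            = s.dropLast.getD (s.dropLast.length - 1 - j) 0 := by
          rw [List.getD_eq_getElem _ _ (by rw [List.length_dropLast]; omega)]
          rw [List.getElem_dropLast]
          congr 1
          rw [List.length_dropLast]
          omega
        rw [hg]
        have hdm := PySem.Int.floordiv_mul_add_mod
          (s.dropLast.getD (s.dropLast.length - 1 - j) 0) 10
        omega
  · rw [pvALoop]
    rw [if_neg (by omega), if_pos (by omega)]
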